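-- pv_equiv track=rewrite | github.com/HKUDS/nanobot | nanobot/channels/nostrchat.py | _pm
-- ===== SOURCE A (Python) =====
-- _GN = [0x3b6a57b2, 0x26508e6d, 0x1ea119fa, 0x3d4233dd, 0x2a1462b3]
--
-- def _pm(vals):
--     c = 1
--     for v in vals:
--         b = c >> 25
--         c = (c & 0x1ffffff) << 5 ^ v
--         for i in range(5):
--             c ^= _GN[i] if (b >> i) & 1 else 0
--     return c
-- ===== SOURCE B (Python) =====
-- _GN = [0x3b6a57b2, 0x26508e6d, 0x1ea119fa, 0x3d4233dd, 0x2a1462b3]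
--
-- # 32-entry table: _T[b] = XOR of _GN[i] over the bits i set in b (0 <= b < 32)
-- _T = []
-- for _b in range(32):
--     _t = 0
--     for _i in range(5):
--         if (_b >> _i) & 1:
--             _t ^= _GN[_i]
--     _T.append(_t)
--
-- def _pm(vals):
--     c = 1
--     for v in vals:
--         b = c >> 25
--         c = (c & 0x1ffffff) << 5 ^ v ^ _T[b % 32]
--     return c
-- ===== Notes on version B (the rewrite author's own statement) =====
-- stated objective: faster
-- what changed: Replaces the five-iteration inner bit loop with a single lookup into a 32-entry table precomputed once (T[b] = XOR of _GN[i] over the bits set in b), folding the per-value update into one expression.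
import Mathlib
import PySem

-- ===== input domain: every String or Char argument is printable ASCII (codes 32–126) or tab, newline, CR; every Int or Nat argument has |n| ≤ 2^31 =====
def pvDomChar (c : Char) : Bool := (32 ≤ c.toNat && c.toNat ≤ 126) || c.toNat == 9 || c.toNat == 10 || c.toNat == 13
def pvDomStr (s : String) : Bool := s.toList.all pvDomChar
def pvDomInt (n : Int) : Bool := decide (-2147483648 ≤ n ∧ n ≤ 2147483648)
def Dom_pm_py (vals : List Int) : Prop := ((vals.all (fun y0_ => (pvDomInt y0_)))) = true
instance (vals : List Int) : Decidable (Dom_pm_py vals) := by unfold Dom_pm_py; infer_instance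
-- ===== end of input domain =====

-- B replaces A's five-iteration inner bit loop by one lookup in a 32-entry table built once.

-- ===== PORT A =====
-- _GN (module constant, shared by both Pythons)
def pmGN : List Int := [0x3b6a57b2, 0x26508e6d, 0x1ea119fa, 0x3d4233dd, 0x2a1462b3]

-- body of A's outer 'for v in vals' loop; the inner 'for i in range(5)' is the foldl.
-- i ∈ {0,…,4}, so 'i.toNat' is exact and the _GN[i] lookup is always in range ('.getD 0' unreachable).
def pmStepA (c v : Int) : Int :=
  let b := Int.shiftRight c 25
  let c1 := PySem.Int.bxor ((PySem.Int.band c 0x1ffffff) <<< (5 : Nat)) v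
  (PySem.List.pyRange 0 5 1).foldl
    (fun c i =>
      PySem.Int.bxor c
        (if PySem.Int.band (Int.shiftRight b i.toNat) 1 ≠ 0 then (PySem.List.pyGet? pmGN i).getD 0 else 0))
    c1

def pm_py (vals : List Int) : Int := vals.foldl pmStepA 1

-- ===== PORT B =====
-- the module-level table build of Source B: _T[b] = XOR of _GN[i] over the bits i set in b
def pmTable : List Int :=
  (PySem.List.pyRange 0 32 1).foldl
    (fun acc b =>
      acc ++ [(PySem.List.pyRange 0 5 1).foldl
        (fun t i =>
          if PySem.Int.band (Int.shiftRight b i.toNat) 1 ≠ 0 then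
            PySem.Int.bxor t ((PySem.List.pyGet? pmGN i).getD 0)
          else t)
        0])
    []

-- body of B's loop: 0 ≤ b % 32 < 32, so the _T lookup is always in range ('.getD 0' unreachable)
def pmStepB (c v : Int) : Int :=
  let b := Int.shiftRight c 25
  PySem.Int.bxor (PySem.Int.bxor ((PySem.Int.band c 0x1ffffff) <<< (5 : Nat)) v)
    ((PySem.List.pyGet? pmTable (PySem.Int.mod b 32)).getD 0)

def pm_py_alt (vals : List Int) : Int := vals.foldl pmStepB 1

-- ===== PRECONDITION & SPEC =====
def Spec_pm_py (vals : List Int) (out : Int) : Prop := out = pm_py_alt vals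
instance (vals : List Int) (out : Int) : Decidable (Spec_pm_py vals out) := by unfold Spec_pm_py; infer_instance

-- ===== CLAIM (what is proved, stated in full; the proofs are below) =====
def Claim_equal_pm_py : Prop := ∀ (vals : List Int), Dom_pm_py vals → Spec_pm_py vals (pm_py vals)

-- ===== LEMMAS AND PROOFS =====

-- bits 0..4 of b are the bits of b % 32 (Python % with positive modulus)
theorem pm_bit_mod32 (b : Int) (i : Nat) (hi : i < 5) :
    PySem.Int.band (Int.shiftRight b i) 1
      = PySem.Int.band (Int.shiftRight (PySem.Int.mod b 32) i) 1 := by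
  rw [← Int.shiftRight_eq, ← Int.shiftRight_eq, PySem.Int.band_one, PySem.Int.band_one,
      PySem.Int.mod_eq_emod_of_pos (a := b >>> i) (by norm_num),
      PySem.Int.mod_eq_emod_of_pos (a := (PySem.Int.mod b 32) >>> i) (by norm_num),
      PySem.Int.mod_eq_emod_of_pos (a := b) (by norm_num),
      Int.shiftRight_eq_div_pow, Int.shiftRight_eq_div_pow]
  interval_cases i <;> norm_num <;> omega

-- xor-chains: xoring two nonnegative values one after the other is xoring their xor
theorem pm_bxor_nat (c : Int) (m n : Nat) :
    PySem.Int.bxor (PySem.Int.bxor c m) n = PySem.Int.bxor c ((m ^^^ n : Nat) : Int) := by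
  by_cases h : 0 ≤ c
  · simp [PySem.Int.bxor, h, Nat.xor_assoc]
  · have h1 : ¬ (0 ≤ -((((-c - 1).toNat ^^^ m : Nat) : Int)) - 1) := by
      have : (0:Int) ≤ (((-c - 1).toNat ^^^ m : Nat) : Int) := Int.natCast_nonneg _
      omega
    simp only [PySem.Int.bxor, if_neg h, if_pos (Int.natCast_nonneg m),
      if_pos (Int.natCast_nonneg n), if_pos (Int.natCast_nonneg (m ^^^ n)),
      Int.toNat_natCast, if_neg h1]
    have h2 : -(-((((-c - 1).toNat ^^^ m : Nat) : Int)) - 1) - 1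
        = (((-c - 1).toNat ^^^ m : Nat) : Int) := by ring
    rw [h2, Int.toNat_natCast, Nat.xor_assoc]

theorem pm_chain5 (c g0 g1 g2 g3 g4 t : Int)
    (h0 : 0 ≤ g0) (h1 : 0 ≤ g1) (h2 : 0 ≤ g2) (h3 : 0 ≤ g3) (h4 : 0 ≤ g4)
    (ht : PySem.Int.bxor (PySem.Int.bxor (PySem.Int.bxor (PySem.Int.bxor g0 g1) g2) g3) g4 = t) :
    PySem.Int.bxor (PySem.Int.bxor (PySem.Int.bxor (PySem.Int.bxor (PySem.Int.bxor c g0) g1) g2) g3) g4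
      = PySem.Int.bxor c t := by
  obtain ⟨m0, rfl⟩ := Int.eq_ofNat_of_zero_le h0
  obtain ⟨m1, rfl⟩ := Int.eq_ofNat_of_zero_le h1
  obtain ⟨m2, rfl⟩ := Int.eq_ofNat_of_zero_le h2
  obtain ⟨m3, rfl⟩ := Int.eq_ofNat_of_zero_le h3
  obtain ⟨m4, rfl⟩ := Int.eq_ofNat_of_zero_le h4
  subst ht
  rw [pm_bxor_nat, pm_bxor_nat, pm_bxor_nat, pm_bxor_nat]
  simp [Nat.xor_assoc]

-- the inner lists are literal
theorem pm_range5 : PySem.List.pyRange 0 5 1 = [0, 1, 2, 3, 4] := by decide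

-- the two loop bodies agree on every state
theorem pm_step_eq (c v : Int) : pmStepA c v = pmStepB c v := by
  unfold pmStepA pmStepB
  simp only [pm_range5, List.foldl,
    show ((0:Int)).toNat = 0 from rfl, show ((1:Int)).toNat = 1 from rfl,
    show ((2:Int)).toNat = 2 from rfl, show ((3:Int)).toNat = 3 from rfl,
    show ((4:Int)).toNat = 4 from rfl,
    pm_bit_mod32 (Int.shiftRight c 25) 0 (by norm_num), pm_bit_mod32 (Int.shiftRight c 25) 1 (by norm_num),
    pm_bit_mod32 (Int.shiftRight c 25) 2 (by norm_num), pm_bit_mod32 (Int.shiftRight c 25) 3 (by norm_num),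
    pm_bit_mod32 (Int.shiftRight c 25) 4 (by norm_num)]
  have hlo : 0 ≤ PySem.Int.mod (Int.shiftRight c 25) 32 := PySem.Int.mod_nonneg _ (by norm_num)
  have hhi : PySem.Int.mod (Int.shiftRight c 25) 32 < 32 := PySem.Int.mod_lt _ (by norm_num)
  generalize PySem.Int.mod (Int.shiftRight c 25) 32 = r at hlo hhi ⊢
  interval_cases r <;>
    exact pm_chain5 _ _ _ _ _ _ _ (by decide) (by decide) (by decide) (by decide) (by decide)
      (by decide)

-- ===== VERDICT (by name: the statement is the Claim_ definition above) =====
theorem pm_py_spec : Claim_equal_pm_py := by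
  intro vals _
  show pm_py vals = pm_py_alt vals
  unfold pm_py pm_py_alt
  rw [funext (fun c => funext (fun v => pm_step_eq c v))]
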